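-- pv_equiv track=rewrite | github.com/FilippoHei/PD-Dyskinesia-Electrophysiology | utils/utils_accelerometer.py | find_event_segments_indices
-- ===== SOURCE A (Python) =====
-- def find_event_segments_indices(array):
--     sections = []
--     start = None
--
--     for i in range(len(array)):
--         if array[i] == 1:
--             if start is None:
--                 start = i
--         else:
--             if start is not None:
--                 sections.append((start, i - 1))
--                 start = None
--
--     if start is not None:
--         sections.append((start, len(array) - 1))
--
--     return sections
-- ===== SOURCE B (Python) =====
-- def find_event_segments_indices(array):
--     # Two-pointer run scan: jump over each maximal run of equal (== 1) truth value
--     # instead of A's per-element start/None state machine.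
--     sections = []
--     n = len(array)
--     i = 0
--     while i < n:
--         j = i
--         while j < n and (array[j] == 1) == (array[i] == 1):
--             j += 1
--         if array[i] == 1:
--             sections.append((i, j - 1))
--         i = j
--     return sections
-- ===== Notes on version B (the rewrite author's own statement) =====
-- stated objective: alternative
-- what changed: Replaces A's per-element start/None state machine with a two-pointer scan that jumps over each maximal run of equal (==1) truth value and emits (run start, run end) directly for 1-runs.
import Mathlib
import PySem

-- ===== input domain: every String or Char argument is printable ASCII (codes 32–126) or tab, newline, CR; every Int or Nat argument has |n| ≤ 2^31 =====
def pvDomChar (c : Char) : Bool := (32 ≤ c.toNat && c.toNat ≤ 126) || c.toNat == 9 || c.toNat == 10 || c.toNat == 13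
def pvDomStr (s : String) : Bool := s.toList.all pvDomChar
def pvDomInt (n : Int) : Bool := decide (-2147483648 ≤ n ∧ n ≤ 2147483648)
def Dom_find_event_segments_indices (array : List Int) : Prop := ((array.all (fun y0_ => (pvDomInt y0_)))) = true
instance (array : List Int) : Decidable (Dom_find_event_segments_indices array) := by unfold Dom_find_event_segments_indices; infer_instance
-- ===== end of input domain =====

-- B replaces A's per-element start/None state machine with a two-pointer scan that
-- jumps over each maximal run of equal (== 1) truth value; objective: alternative.

-- ===== PORT A =====
-- A's for-loop over i in range(len(array)) as structural recursion over the list,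
-- carrying the same state (sections, start) plus the current index i.
def pvALoop : List Int → Int → List (Int × Int) → Option Int → List (Int × Int) × Option Int
  | [], _, sections, start => (sections, start)
  | x :: xs, i, sections, start =>
      if x == 1 then
        match start with
        | none => pvALoop xs (i + 1) sections (some i)
        | some _ => pvALoop xs (i + 1) sections start
      else
        match start with
        | some s => pvALoop xs (i + 1) (sections ++ [(s, i - 1)]) none
        | none => pvALoop xs (i + 1) sections start

def find_event_segments_indices (array : List Int) : List (Int × Int) :=
  let r := pvALoop array 0 [] none
  match r.2 with
  | some s => r.1 ++ [(s, (array.length : Int) - 1)]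
  | none => r.1

-- ===== PORT B =====
-- B's outer while loop: each step consumes one maximal run of equal (== 1) truth
-- value (the inner 'while … j += 1' is the takeWhile/dropWhile split) and advances i.
def pvBLoop (i : Int) : List Int → List (Int × Int)
  | [] => []
  | x :: xs =>
      let grp := xs.takeWhile (fun y => (y == 1) == (x == 1))
      let rest := xs.dropWhile (fun y => (y == 1) == (x == 1))
      let len : Int := 1 + grp.length
      if x == 1 then (i, i + len - 1) :: pvBLoop (i + len) rest
      else pvBLoop (i + len) rest
  termination_by xs => xs.length
  decreasing_by
    all_goals
      show (List.dropWhile (fun y => (y == 1) == (x == 1)) xs).length < (x :: xs).length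
      simp only [List.length_cons]
      exact Nat.lt_succ_of_le (List.length_dropWhile_le _ xs)

def find_event_segments_indices_alt (array : List Int) : List (Int × Int) :=
  pvBLoop 0 array

-- ===== PRECONDITION & SPEC =====
def Spec_find_event_segments_indices (array : List Int) (out : List (Int × Int)) : Prop := out = find_event_segments_indices_alt array
instance (array : List Int) (out : List (Int × Int)) : Decidable (Spec_find_event_segments_indices array out) := by unfold Spec_find_event_segments_indices; infer_instance

-- ===== CLAIM (what is proved, stated in full; the proofs are below) =====
def Claim_equal_find_event_segments_indices : Prop := ∀ (array : List Int), Dom_find_event_segments_indices array → Spec_find_event_segments_indices array (find_event_segments_indices array)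

-- ===== LEMMAS AND PROOFS =====

-- finishing step of A: flush a pending run (started at s) at end index e
def pvFin (p : List (Int × Int) × Option Int) (e : Int) : List (Int × Int) :=
  match p.2 with
  | some s => p.1 ++ [(s, e)]
  | none => p.1

-- a leading non-1 element is absorbed into (or opens) a skipped group of B
theorem pvBLoop_skip (xs : List Int) (i : Int) (x : Int) (hx : (x == 1) = false) :
    pvBLoop i (x :: xs) = pvBLoop (i + 1) xs := by
  cases xs with
  | nil => simp [pvBLoop, hx]
  | cons y ys =>
    by_cases hy : (y == 1) = true
    · rw [pvBLoop]
      simp [hx, hy, List.takeWhile_cons_of_neg, List.dropWhile_cons_of_neg]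
    · rw [Bool.not_eq_true] at hy
      rw [pvBLoop, pvBLoop]
      simp only [hx, hy, Bool.false_eq_true, if_false, List.takeWhile_cons, List.dropWhile_cons,
        beq_self_eq_true, if_true, List.length_cons]
      congr 1
      push_cast; ring

-- main invariant: A's loop followed by the final flush equals sections ++ B's remaining scan
theorem pvLoop_eq (xs : List Int) (i : Int) (sections : List (Int × Int))
    (start : Option Int) :
    pvFin (pvALoop xs i sections start) (i + xs.length - 1) =
      sections ++ (match start with
        | none => pvBLoop i xs
        | some s =>
            (s, i + ((xs.takeWhile (fun y => y == 1)).length : Int) - 1) ::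
              pvBLoop (i + ((xs.takeWhile (fun y => y == 1)).length : Int))
                (xs.dropWhile (fun y => y == 1))) := by
  induction xs generalizing i sections start with
  | nil =>
    cases start <;> simp [pvALoop, pvFin, pvBLoop]
  | cons x xs ih =>
    have hlen : i + (((x :: xs).length : Nat) : Int) - 1 = i + 1 + (xs.length : Int) - 1 := by
      push_cast [List.length_cons]; ring
    by_cases hx : (x == 1) = true
    · cases start with
      | none =>
        rw [pvALoop]
        simp only [hx, if_true, hlen]
        rw [ih (i + 1) sections (some i)]
        rw [pvBLoop]
        simp only [hx, if_true,
          show (fun y : Int => (y == 1) == true) = (fun y : Int => y == 1) from by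
            funext y; simp]
        congr 3
        · ring
        · ring
      | some s =>
        rw [pvALoop]
        simp only [hx, if_true, hlen]
        rw [ih (i + 1) sections (some s)]
        simp only [List.takeWhile_cons, List.dropWhile_cons, hx, if_true, List.length_cons]
        congr 3
        · push_cast; ring
        · push_cast; ring
    · rw [Bool.not_eq_true] at hx
      cases start with
      | none =>
        rw [pvALoop]
        simp only [hx, Bool.false_eq_true, if_false, hlen]
        rw [ih (i + 1) sections none, ← pvBLoop_skip xs i x hx]
      | some s =>
        rw [pvALoop]
        simp only [hx, Bool.false_eq_true, if_false, hlen]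
        rw [ih (i + 1) (sections ++ [(s, i - 1)]) none, ← pvBLoop_skip xs i x hx]
        simp [hx]

-- ===== VERDICT (by name: the statement is the Claim_ definition above) =====
theorem find_event_segments_indices_spec : Claim_equal_find_event_segments_indices := by
  intro array _
  unfold Spec_find_event_segments_indices find_event_segments_indices find_event_segments_indices_alt
  have h := pvLoop_eq array 0 [] none
  simp only [pvFin, zero_add, List.nil_append] at h
  cases hr : (pvALoop array 0 [] none).2 with
  | none => simp only [hr]; simpa [hr] using h
  | some s => simp only [hr]; simpa [hr] using h
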